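-- pv_equiv track=rewrite | github.com/comu2e/Atcoder | kindle/abc186/c/main.py | judge_7_in_oct
-- ===== SOURCE A (Python) =====
-- def judge_7_in_oct(n):
--     flag = False
--     oct = ""
--     init_n = n
--     while init_n > 0:
--         oct += str(init_n % 8)
--         init_n = init_n // 8
--         if "7" in oct:
--             flag = True
--             return flag
--             break
--     return flag
-- ===== SOURCE B (Python) =====
-- def judge_7_in_oct(n):
--     return n > 0 and "7" in oct(n)
-- ===== Notes on version B (the rewrite author's own statement) =====
-- stated objective: idiomatic
-- what changed: Replaces the manual base-8 digit-extraction loop with early return by a single built-in oct(n) conversion plus a substring test, guarded by n > 0 to match A on non-positive inputs.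
import Mathlib
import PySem

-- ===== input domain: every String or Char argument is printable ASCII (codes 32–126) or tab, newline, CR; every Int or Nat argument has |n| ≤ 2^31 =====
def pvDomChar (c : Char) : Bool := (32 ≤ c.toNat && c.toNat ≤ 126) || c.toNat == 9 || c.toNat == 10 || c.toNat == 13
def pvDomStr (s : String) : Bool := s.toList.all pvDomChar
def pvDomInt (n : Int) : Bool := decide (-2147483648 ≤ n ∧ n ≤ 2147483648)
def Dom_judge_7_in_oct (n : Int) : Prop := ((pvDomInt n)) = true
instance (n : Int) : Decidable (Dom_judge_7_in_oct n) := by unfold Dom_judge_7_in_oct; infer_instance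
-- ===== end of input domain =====

-- B replaces A's manual digit loop by an octal-string conversion plus a substring test (idiomatic).

-- termination helper for both loops: n // 8 shrinks for n > 0
theorem pvDiv8_lt (n : Int) (h : 0 < n) :
    (PySem.Int.floordiv n 8).toNat < n.toNat := by
  rw [PySem.Int.floordiv_eq_ediv_of_pos (by norm_num : (0:Int) < 8)]
  omega

-- ===== PORT A =====
-- while init_n > 0: oct += str(init_n % 8); init_n //= 8; if "7" in oct: return True
def judgeLoopA (initN : Int) (oct : String) : Bool :=
  if h : initN > 0 then
    let oct' := oct ++ PySem.Int.toStr (PySem.Int.mod initN 8)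
    if PySem.Str.isIn "7" oct' then true
    else judgeLoopA (PySem.Int.floordiv initN 8) oct'
  else false
termination_by initN.toNat
decreasing_by exact pvDiv8_lt initN h

def judge_7_in_oct (n : Int) : Bool := judgeLoopA n ""

-- ===== PORT B =====
-- hand port of Python's oct(n) for n > 0: "0o" followed by the base-8 digits,
-- most significant first (exact on positive inputs, the only ones B feeds it)
def octBody (n : Int) : String :=
  if h : n < 8 then PySem.Int.toStr n
  else octBody (PySem.Int.floordiv n 8) ++ PySem.Int.toStr (PySem.Int.mod n 8)
termination_by n.toNat
decreasing_by exact pvDiv8_lt n (by omega)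

def judge_7_in_oct_alt (n : Int) : Bool :=
  decide (n > 0) && PySem.Str.isIn "7" ("0o" ++ octBody n)

-- ===== PRECONDITION & SPEC =====
def Spec_judge_7_in_oct (n : Int) (out : Bool) : Prop := out = judge_7_in_oct_alt n
instance (n : Int) (out : Bool) : Decidable (Spec_judge_7_in_oct n out) := by unfold Spec_judge_7_in_oct; infer_instance

-- ===== CLAIM (what is proved, stated in full; the proofs are below) =====
def Claim_equal_judge_7_in_oct : Prop := ∀ (n : Int), Dom_judge_7_in_oct n → Spec_judge_7_in_oct n (judge_7_in_oct n)

-- ===== LEMMAS AND PROOFS =====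

-- "some base-8 digit of n is 7", the common characterisation
def has7 (n : Int) : Bool :=
  if h : 0 < n then
    (PySem.Int.mod n 8 == 7) || has7 (PySem.Int.floordiv n 8)
  else false
termination_by n.toNat
decreasing_by exact pvDiv8_lt n h

theorem isIn7_eq_contains (s : String) :
    PySem.Str.isIn "7" s = s.toList.contains '7' := by
  rcases h : s.toList.contains '7' with _ | _
  · simp only [List.contains_eq_mem, decide_eq_false_iff_not] at h
    rw [← Bool.not_eq_true, PySem.Str.isIn_iff_infix]
    intro hinf
    exact h (by simpa using hinf.mem (by simp : '7' ∈ ("7" : String).toList))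
  · simp only [List.contains_eq_mem, decide_eq_true_eq] at h
    rw [PySem.Str.isIn_iff_infix]
    obtain ⟨l1, l2, hl⟩ := List.append_of_mem h
    exact ⟨l1, l2, by simpa using hl.symm⟩

theorem toStr_digit_contains (d : Int) (h0 : 0 ≤ d) (h8 : d < 8) :
    (PySem.Int.toStr d).toList.contains '7' = (d == 7) := by
  interval_cases d <;> decide

theorem judgeLoopA_eq (k : Nat) (n : Int) (oct : String)
    (hk : n.toNat ≤ k) (hoct : oct.toList.contains '7' = false) :
    judgeLoopA n oct = has7 n := by
  induction k generalizing n oct with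
  | zero =>
    rw [judgeLoopA, has7]
    have : ¬ 0 < n := by omega
    simp [this]
  | succ k ih =>
    rw [judgeLoopA, has7]
    by_cases h : 0 < n
    · simp only [h, dif_pos]
      have hd0 : 0 ≤ PySem.Int.mod n 8 := PySem.Int.mod_nonneg _ (by norm_num)
      have hd8 : PySem.Int.mod n 8 < 8 := PySem.Int.mod_lt _ (by norm_num)
      have happ : (oct ++ PySem.Int.toStr (PySem.Int.mod n 8)).toList.contains '7'
          = (PySem.Int.mod n 8 == 7) := by
        rw [String.toList_append, List.contains_append, hoct,
          toStr_digit_contains _ hd0 hd8, Bool.false_or]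
      rw [isIn7_eq_contains, happ]
      rcases h7 : (PySem.Int.mod n 8 == 7) with _ | _
      · rw [if_neg Bool.false_ne_true, Bool.false_or]
        exact ih _ _ (by have := pvDiv8_lt n h; omega) (by rw [happ, h7])
      · simp
    · simp [h]

theorem octBody_contains (k : Nat) (n : Int) (hk : n.toNat ≤ k) (hn : 0 < n) :
    (octBody n).toList.contains '7' = has7 n := by
  induction k generalizing n with
  | zero => omega
  | succ k ih =>
    rw [octBody, has7, dif_pos hn]
    by_cases h : n < 8
    · rw [dif_pos h, toStr_digit_contains n (by omega) h]
      have hm : PySem.Int.mod n 8 = n := by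
        have := PySem.Int.floordiv_mul_add_mod n 8
        rw [PySem.Int.floordiv_eq_ediv_of_pos (by norm_num : (0:Int) < 8)] at this
        omega
      have hd : PySem.Int.floordiv n 8 = 0 := by
        rw [PySem.Int.floordiv_eq_ediv_of_pos (by norm_num : (0:Int) < 8)]; omega
      rw [hm, hd, has7]; simp
    · rw [dif_neg h]
      have hdpos : 0 < PySem.Int.floordiv n 8 := by
        rw [PySem.Int.floordiv_eq_ediv_of_pos (by norm_num : (0:Int) < 8)]; omega
      rw [String.toList_append, List.contains_append,
        ih _ (by have := pvDiv8_lt n hn; omega) hdpos,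
        toStr_digit_contains _ (PySem.Int.mod_nonneg _ (by norm_num))
          (PySem.Int.mod_lt _ (by norm_num)), Bool.or_comm]

-- ===== VERDICT (by name: the statement is the Claim_ definition above) =====
theorem judge_7_in_oct_spec : Claim_equal_judge_7_in_oct := by
  intro n _
  unfold Spec_judge_7_in_oct judge_7_in_oct judge_7_in_oct_alt
  by_cases h : 0 < n
  · rw [judgeLoopA_eq n.toNat n "" le_rfl (by decide), isIn7_eq_contains,
      String.toList_append, List.contains_append,
      octBody_contains n.toNat n le_rfl h]
    simp [h]
  · rw [judgeLoopA_eq 0 n "" (by omega) (by decide), has7]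
    simp [h]
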